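-- pv_equiv track=rewrite | github.com/jmahabal/dont-call-me-iggy | main.py | has_iggy
-- ===== SOURCE A (Python) =====
-- import string
--
-- def has_iggy(text):
--     text = text.lower()
--     if "azalea" in text:
--         return False
--     if "'iggy'" in text or '"iggy"' in text:
--         return False
--
--     # strip punctuation and split on spaces
--     exclude = set(string.punctuation) - set("-") # for dont-call-me-iggy
--     text = ''.join(ch if ch not in exclude else " " for ch in text).split()
--
--     if "bot" in text:
--         return False
--
--     iggies = []
--     for g in range(2, 5):
--         for y in range(1, 8):
--             iggies.append('i' + 'g'*g + 'y'*y)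
--
--     return any(iggy in text for iggy in iggies)
-- ===== SOURCE B (Python) =====
-- import string
--
-- def _is_iggy_word(w):
--     if not w or w[0] != 'i':
--         return False
--     i = 1
--     g = 0
--     while i < len(w) and w[i] == 'g':
--         g += 1
--         i += 1
--     y = 0
--     while i < len(w) and w[i] == 'y':
--         y += 1
--         i += 1
--     return i == len(w) and 2 <= g <= 4 and 1 <= y <= 7
--
-- def has_iggy(text):
--     text = text.lower()
--     if "azalea" in text:
--         return False
--     if "'iggy'" in text or '"iggy"' in text:
--         return False
--     exclude = set(string.punctuation) - set("-")
--     words = ''.join(" " if ch in exclude else ch for ch in text).split()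
--     if "bot" in words:
--         return False
--     return any(_is_iggy_word(w) for w in words)
-- ===== Notes on version B (the rewrite author's own statement) =====
-- stated objective: idiomatic
-- what changed: B drops the generation of the 21 iggy-variant strings and the membership test of each variant against the word list, and instead scans each word once, checking structurally that it is the letter i followed by two to four g letters and then one to seven y letters.
import Mathlib
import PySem

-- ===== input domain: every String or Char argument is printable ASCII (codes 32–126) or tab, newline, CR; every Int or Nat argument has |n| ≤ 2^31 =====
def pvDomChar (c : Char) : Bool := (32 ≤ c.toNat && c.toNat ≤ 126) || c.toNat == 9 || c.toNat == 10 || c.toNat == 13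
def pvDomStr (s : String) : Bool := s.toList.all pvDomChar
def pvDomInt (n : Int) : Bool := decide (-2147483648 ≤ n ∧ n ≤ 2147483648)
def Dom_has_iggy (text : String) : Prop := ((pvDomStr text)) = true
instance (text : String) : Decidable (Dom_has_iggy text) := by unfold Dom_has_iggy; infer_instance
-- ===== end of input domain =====

-- B replaces the generation of the 21 iggy-variant strings and their list-membership test by a single structural scan of each word; objective: idiomatic.

-- ===== PORT A =====
-- string.punctuation
def pvPunct : List Char := "!\"#$%&'()*+,-./:;<=>?@[\\]^_`{|}~".toList

def has_iggy (text : String) : Bool :=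
  let text := PySem.Str.lower text
  if PySem.Str.isIn "azalea" text then false
  else if PySem.Str.isIn "'iggy'" text || PySem.Str.isIn "\"iggy\"" text then false
  else
    let exclude := PySem.Set.diff (PySem.Set.ofList pvPunct) (PySem.Set.ofList ['-'])
    let words := PySem.Chars.split₀
      (text.toList.map (fun ch => if !(PySem.Set.contains exclude ch) then ch else ' '))
    if words.contains ('b' :: 'o' :: 't' :: []) then false
    else
      let iggies := (PySem.List.pyRange 2 5 1).foldl (fun acc g =>
        (PySem.List.pyRange 1 8 1).foldl (fun acc y =>
          acc ++ ['i' :: (List.replicate g.toNat 'g' ++ List.replicate y.toNat 'y')]) acc) []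
      iggies.any (fun iggy => words.contains iggy)

-- ===== PORT B =====
-- the two while loops of _is_iggy_word: count leading copies of c, return (count, rest)
def pvCountWhile (c : Char) : List Char → Nat × List Char
  | [] => (0, [])
  | x :: xs =>
    if x = c then
      let p := pvCountWhile c xs
      (p.1 + 1, p.2)
    else (0, x :: xs)

def pvIsIggyWord (w : List Char) : Bool :=
  match w with
  | [] => false
  | c :: rest =>
    if c = 'i' then
      let p := pvCountWhile 'g' rest
      let q := pvCountWhile 'y' p.2
      q.2.isEmpty && 2 ≤ p.1 && p.1 ≤ 4 && 1 ≤ q.1 && q.1 ≤ 7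
    else false

def has_iggy_alt (text : String) : Bool :=
  let text := PySem.Str.lower text
  if PySem.Str.isIn "azalea" text then false
  else if PySem.Str.isIn "'iggy'" text || PySem.Str.isIn "\"iggy\"" text then false
  else
    let exclude := PySem.Set.diff (PySem.Set.ofList pvPunct) (PySem.Set.ofList ['-'])
    let words := PySem.Chars.split₀
      (text.toList.map (fun ch => if PySem.Set.contains exclude ch then ' ' else ch))
    if words.contains ('b' :: 'o' :: 't' :: []) then false
    else
      words.any pvIsIggyWord

-- ===== PRECONDITION & SPEC =====
def Spec_has_iggy (text : String) (out : Bool) : Prop := out = has_iggy_alt text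
instance (text : String) (out : Bool) : Decidable (Spec_has_iggy text out) := by unfold Spec_has_iggy; infer_instance

-- ===== CLAIM (what is proved, stated in full; the proofs are below) =====
def Claim_equal_has_iggy : Prop := ∀ (text : String), Dom_has_iggy text → Spec_has_iggy text (has_iggy text)

-- ===== LEMMAS AND PROOFS =====

-- the canonical shape both programs recognise
def pvShape (w : List Char) : Prop :=
  ∃ g y : Nat, 2 ≤ g ∧ g ≤ 4 ∧ 1 ≤ y ∧ y ≤ 7 ∧
    w = 'i' :: (List.replicate g 'g' ++ List.replicate y 'y')

theorem pvCountWhile_spec (c : Char) (xs : List Char) :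
    xs = List.replicate (pvCountWhile c xs).1 c ++ (pvCountWhile c xs).2 ∧
      ∀ h ∈ (pvCountWhile c xs).2.head?, h ≠ c := by
  induction xs with
  | nil => simp [pvCountWhile]
  | cons x xs ih =>
    by_cases hx : x = c
    · simp only [pvCountWhile, if_pos hx]
      exact ⟨by simpa [List.replicate_succ, hx] using ih.1, ih.2⟩
    · simp [pvCountWhile, hx]

theorem pvCountWhile_replicate (c : Char) (n : Nat) (rest : List Char)
    (h : ∀ x ∈ rest.head?, x ≠ c) :
    pvCountWhile c (List.replicate n c ++ rest) = (n, rest) := by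
  induction n with
  | zero =>
    cases rest with
    | nil => rfl
    | cons a b =>
      have ha : a ≠ c := h a rfl
      simp [pvCountWhile, ha]
  | succ n ih =>
    simp [List.replicate_succ, pvCountWhile, ih]

theorem pvIsIggyWord_iff (w : List Char) :
    pvIsIggyWord w = true ↔ pvShape w := by
  constructor
  · intro h
    cases w with
    | nil => simp [pvIsIggyWord] at h
    | cons c rest =>
      by_cases hc : c = 'i'
      · subst hc
        simp [pvIsIggyWord] at h
        obtain ⟨⟨⟨⟨hq2, hg2⟩, hg4⟩, hy1⟩, hy7⟩ := h
        obtain ⟨hg, -⟩ := pvCountWhile_spec 'g' rest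
        obtain ⟨hy, -⟩ := pvCountWhile_spec 'y' (pvCountWhile 'g' rest).2
        rw [hq2, List.append_nil] at hy
        rw [hy] at hg
        exact ⟨_, _, hg2, hg4, hy1, hy7, congrArg (fun t => 'i' :: t) hg⟩
      · simp only [pvIsIggyWord, if_neg hc] at h
        exact absurd h (by simp)
  · rintro ⟨g, y, hg2, hg4, hy1, hy7, rfl⟩
    obtain ⟨y', rfl⟩ : ∃ y', y = y' + 1 := ⟨y - 1, by omega⟩
    have hgcw : pvCountWhile 'g' (List.replicate g 'g' ++ List.replicate (y' + 1) 'y')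
        = (g, List.replicate (y' + 1) 'y') := by
      apply pvCountWhile_replicate
      intro x hx
      simp only [List.replicate_succ, List.head?_cons, Option.mem_some_iff] at hx
      rw [← hx]; decide
    have hycw : pvCountWhile 'y' (List.replicate (y' + 1) 'y') = (y' + 1, []) := by
      have := pvCountWhile_replicate 'y' (y' + 1) [] (by simp)
      simpa using this
    simp [pvIsIggyWord, hgcw, hycw]
    omega

theorem pvMemIggies_iff (w : List Char) :
    w ∈ ((PySem.List.pyRange 2 5 1).foldl (fun acc g =>
        (PySem.List.pyRange 1 8 1).foldl (fun acc y =>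
          acc ++ ['i' :: (List.replicate g.toNat 'g' ++ List.replicate y.toNat 'y')]) acc)
        ([] : List (List Char)))
      ↔ pvShape w := by
  simp only [PySem.List.foldl_append_singleton_eq_map]
  rw [show (fun (acc : List (List Char)) (g : Int) =>
      acc ++ (PySem.List.pyRange 1 8 1).map
        (fun y => 'i' :: (List.replicate g.toNat 'g' ++ List.replicate y.toNat 'y')))
    = (fun acc g => acc ++ (fun (g : Int) => (PySem.List.pyRange 1 8 1).map
        (fun y => 'i' :: (List.replicate g.toNat 'g' ++ List.replicate y.toNat 'y'))) g) from rfl]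
  rw [PySem.List.foldl_append_eq_flatMap]
  have h25 : PySem.List.pyRange 2 5 1 = [2, 3, 4] := by decide
  have h18 : PySem.List.pyRange 1 8 1 = [1, 2, 3, 4, 5, 6, 7] := by decide
  rw [h25, h18]
  simp only [List.nil_append, List.mem_flatMap, List.mem_map, List.mem_cons,
    List.not_mem_nil, or_false]
  constructor
  · rintro ⟨g, hg, y, hy, rfl⟩
    refine ⟨g.toNat, y.toNat, ?_, ?_, ?_, ?_, rfl⟩ <;> omega
  · rintro ⟨g, y, hg2, hg4, hy1, hy7, rfl⟩
    refine ⟨(g : Int), by omega, (y : Int), by omega, ?_⟩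
    simp
-- note: 'hg : g = 2 ∨ g = 3 ∨ g = 4' etc. feed omega, which also evaluates Int.toNat

theorem pvAnyIggies (words : List (List Char)) :
    (((PySem.List.pyRange 2 5 1).foldl (fun acc g =>
        (PySem.List.pyRange 1 8 1).foldl (fun acc y =>
          acc ++ ['i' :: (List.replicate g.toNat 'g' ++ List.replicate y.toNat 'y')]) acc)
        ([] : List (List Char))).any (fun iggy => words.contains iggy))
      = words.any pvIsIggyWord := by
  rw [Bool.eq_iff_iff]
  simp only [List.any_eq_true, List.contains_eq_mem, decide_eq_true_eq]
  constructor
  · rintro ⟨ig, hig, hmem⟩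
    exact ⟨ig, hmem, (pvIsIggyWord_iff ig).mpr ((pvMemIggies_iff ig).mp hig)⟩
  · rintro ⟨w, hw, hii⟩
    exact ⟨w, (pvMemIggies_iff w).mpr ((pvIsIggyWord_iff w).mp hii), hw⟩

-- ===== VERDICT (by name: the statement is the Claim_ definition above) =====
set_option maxHeartbeats 1000000 in
theorem has_iggy_spec : Claim_equal_has_iggy := by
  intro text _
  unfold Spec_has_iggy has_iggy has_iggy_alt
  have hmap : ∀ (s : List Char) (ex : PySem.Set Char),
      s.map (fun ch => if !(PySem.Set.contains ex ch) then ch else ' ')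
        = s.map (fun ch => if PySem.Set.contains ex ch then ' ' else ch) := by
    intro s ex
    apply List.map_congr_left
    intro ch _
    by_cases h : PySem.Set.contains ex ch <;> simp only [h, Bool.not_true, Bool.not_false, Bool.false_eq_true, if_true, if_false]
  simp only [hmap]
  split_ifs <;> first | exact pvAnyIggies _ | rfl
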